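-- pv_equiv track=rewrite | github.com/Hodobox/DM1_variant_repeat | pyth_orig/main.py | produce_sequences
-- ===== SOURCE A (Python) =====
-- def produce_sequences(pattern, max_length, outer_index, inner_index, partial_result):
--     if len(partial_result) >= max_length:
--         return [partial_result]
--
--     current_pattern = pattern[outer_index]
--     results = []
--     next_pattern_available = (outer_index != len(pattern) - 1) and (inner_index == 0)
--
--     next_inner_index = (inner_index + 1) % len(current_pattern)
--     current_character = pattern[outer_index][inner_index]
--     next_partial = partial_result + current_character
--
--     if next_pattern_available:
--         jump_right_now = produce_sequences(pattern, max_length, outer_index + 1, 0, partial_result)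
--         for p in jump_right_now:
--             results.append(p)
--
--     same_pattern_result = produce_sequences(pattern, max_length, outer_index, next_inner_index, next_partial)
--     for p in same_pattern_result:
--         results.append(p)
--
--     return results
-- ===== SOURCE B (Python) =====
-- def produce_sequences(pattern, max_length, outer_index, inner_index, partial_result):
--     results = []
--     stack = [(outer_index, inner_index, partial_result)]
--     while stack:
--         oi, ii, pr = stack.pop()
--         if len(pr) >= max_length:
--             results.append(pr)
--             continue
--         current = pattern[oi]
--         next_ii = (ii + 1) % len(current)
--         ch = current[ii]
--         # push same-pattern continuation first so the jump branch is popped (emitted) first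
--         stack.append((oi, next_ii, pr + ch))
--         if oi != len(pattern) - 1 and ii == 0:
--             stack.append((oi + 1, 0, pr))
--     return results
-- ===== Notes on version B (the rewrite author's own statement) =====
-- stated objective: alternative
-- what changed: Replaced the recursion (two recursive calls whose results are appended) by an iterative DFS over an explicit stack of (outer_index, inner_index, partial) frames with a single results accumulator, pushing continuations so pop order reproduces A's output order.
import Mathlib
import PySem

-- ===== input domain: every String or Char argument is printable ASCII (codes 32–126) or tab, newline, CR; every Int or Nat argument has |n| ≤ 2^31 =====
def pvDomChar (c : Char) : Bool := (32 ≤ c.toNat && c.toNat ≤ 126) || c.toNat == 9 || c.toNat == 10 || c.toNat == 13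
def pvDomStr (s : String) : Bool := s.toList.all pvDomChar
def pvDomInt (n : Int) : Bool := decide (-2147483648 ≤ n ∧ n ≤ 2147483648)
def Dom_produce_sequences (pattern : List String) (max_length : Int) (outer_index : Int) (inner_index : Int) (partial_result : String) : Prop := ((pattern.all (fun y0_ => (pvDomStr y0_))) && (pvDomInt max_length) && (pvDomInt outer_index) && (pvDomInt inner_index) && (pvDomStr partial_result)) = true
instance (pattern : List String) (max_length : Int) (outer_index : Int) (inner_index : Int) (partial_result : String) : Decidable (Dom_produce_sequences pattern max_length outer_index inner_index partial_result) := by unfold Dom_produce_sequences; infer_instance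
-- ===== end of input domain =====

-- B replaces A's recursion by an iterative DFS over an explicit stack with one results accumulator (alternative decomposition, same output).

-- Upper bound on the recursion depth of both programs from a given state; supplies the fuel that
-- makes the structural-recursion ports total (the adequacy lemmas below show it is never exhausted).
def psMu (plen : Nat) (max_length : Int) (oi : Int) (prlen : Nat) : Nat :=
  (max_length.toNat - prlen) * (2 * plen + 1) + (2 * plen - (oi + (plen : Int)).toNat)

-- ===== PORT A =====
-- A's recursion, on List Char for the partial result; fuel only makes the recursion structural
-- (produce_sequences passes psMu + 1, which the fuel-adequacy lemma proves sufficient).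
-- A `none`/length-0 branch returns [] exactly where the Python raises (IndexError /
-- ZeroDivisionError) — those inputs are excluded by Pre_.
def psAuxF (fuel : Nat) (pattern : List String) (max_length : Int) (outer_index : Int)
    (inner_index : Int) (partial_result : List Char) : List (List Char) :=
  match fuel with
  | 0 => []   -- never reached when fuel > psMu (lemma psAuxF_fuel below)
  | fuel + 1 =>
    if (partial_result.length : Int) ≥ max_length then [partial_result]
    else
      match PySem.List.pyGet? pattern outer_index with
      | none => []   -- Python: IndexError on pattern[outer_index]
      | some current_pattern =>
        if current_pattern.toList.length = 0 then []   -- Python: ZeroDivisionError on % 0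
        else
          match PySem.List.pyGet? current_pattern.toList inner_index with
          | none => []   -- Python: IndexError on the character lookup
          | some current_character =>
            (if outer_index ≠ (pattern.length : Int) - 1 ∧ inner_index = 0 then
                psAuxF fuel pattern max_length (outer_index + 1) 0 partial_result
              else []) ++
            psAuxF fuel pattern max_length outer_index
              (PySem.Int.mod (inner_index + 1) (current_pattern.toList.length : Int))
              (partial_result ++ [current_character])

def produce_sequences (pattern : List String) (max_length : Int) (outer_index : Int) (inner_index : Int) (partial_result : String) : List String :=
  (psAuxF (psMu pattern.length max_length outer_index partial_result.toList.length + 1)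
      pattern max_length outer_index inner_index partial_result.toList).map String.ofList

-- ===== PORT B =====
-- B's while loop: pop a frame, emit or push continuations (jump pushed last, so popped first).
-- fuel bounds the number of loop iterations (3 ^ psMu at the start; adequacy proved below).
-- A frame on which the Python would raise is excluded by Pre_; the port skips it.
def psAltRunF (fuel : Nat) (pattern : List String) (max_length : Int)
    (stack : List (Int × Int × List Char)) (results : List (List Char)) : List (List Char) :=
  match stack with
  | [] => results
  | (oi, ii, pr) :: rest =>
    match fuel with
    | 0 => results   -- never reached when fuel ≥ the stack's measure (lemma psAltRunF_eq below)
    | fuel + 1 =>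
      if (pr.length : Int) ≥ max_length then
        psAltRunF fuel pattern max_length rest (results ++ [pr])
      else
        match PySem.List.pyGet? pattern oi with
        | none => psAltRunF fuel pattern max_length rest results   -- Python: IndexError
        | some current =>
          if current.toList.length = 0 then
            psAltRunF fuel pattern max_length rest results   -- Python: ZeroDivisionError
          else
            match PySem.List.pyGet? current.toList ii with
            | none => psAltRunF fuel pattern max_length rest results   -- Python: IndexError
            | some ch =>
              if oi ≠ (pattern.length : Int) - 1 ∧ ii = 0 then
                psAltRunF fuel pattern max_length
                  ((oi + 1, 0, pr) :: (oi, PySem.Int.mod (ii + 1) (current.toList.length : Int), pr ++ [ch]) :: rest) results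
              else
                psAltRunF fuel pattern max_length
                  ((oi, PySem.Int.mod (ii + 1) (current.toList.length : Int), pr ++ [ch]) :: rest) results

def produce_sequences_alt (pattern : List String) (max_length : Int) (outer_index : Int) (inner_index : Int) (partial_result : String) : List String :=
  (psAltRunF (3 ^ psMu pattern.length max_length outer_index partial_result.toList.length)
      pattern max_length [(outer_index, inner_index, partial_result.toList)] []).map String.ofList

-- ===== PRECONDITION & SPEC =====
-- Pre_ is EXACTLY the set of inputs on which Python A returns (no exception): either the length
-- cutoff fires immediately, or the first frame's lookups succeed (pattern[outer_index] in range,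
-- nonempty, inner_index in range of it) and, IF the recursion ever jumps to a later pattern entry
-- (raw outer_index ≠ len-1 and the inner index cycles to 0 while the partial is still short:
-- start length + t0 < max_length, t0 = steps until the inner index is 0), every entry the jump
-- chain visits (all later entries; for a negative raw start index the chain wraps and visits every
-- entry) is nonempty — an empty visited entry is Python's ZeroDivisionError on `% len(...)`.
def Pre_produce_sequences (pattern : List String) (max_length : Int) (outer_index : Int) (inner_index : Int) (partial_result : String) : Prop :=
  ((partial_result.toList.length : Int) ≥ max_length) ∨
  (PySem.Raise.InRange pattern.length outer_index ∧
   (let cur := (PySem.List.pyGet? pattern outer_index).getD ""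
    cur ≠ "" ∧ PySem.Raise.InRange cur.toList.length inner_index ∧
    (let t0 : Int := if inner_index = 0 then 0
                     else (cur.toList.length : Int) - PySem.Int.mod inner_index (cur.toList.length : Int)
     (outer_index ≠ (pattern.length : Int) - 1 ∧ (partial_result.toList.length : Int) + t0 < max_length) →
       ∀ s ∈ pattern.drop (if outer_index < 0 then 0 else outer_index.toNat + 1), s ≠ "")))
instance (pattern : List String) (max_length : Int) (outer_index : Int) (inner_index : Int) (partial_result : String) : Decidable (Pre_produce_sequences pattern max_length outer_index inner_index partial_result) := by unfold Pre_produce_sequences; infer_instance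

def pvWitness_produce_sequences : List String × Int × Int × Int × String := (["ab", "c"], 2, 0, 0, "")

def Spec_produce_sequences (pattern : List String) (max_length : Int) (outer_index : Int) (inner_index : Int) (partial_result : String) (out : List String) : Prop := out = produce_sequences_alt pattern max_length outer_index inner_index partial_result
instance (pattern : List String) (max_length : Int) (outer_index : Int) (inner_index : Int) (partial_result : String) (out : List String) : Decidable (Spec_produce_sequences pattern max_length outer_index inner_index partial_result out) := by unfold Spec_produce_sequences; infer_instance

-- ===== CLAIM (what is proved, stated in full; the proofs are below) =====
def Claim_equal_produce_sequences : Prop := ∀ (pattern : List String) (max_length : Int) (outer_index : Int) (inner_index : Int) (partial_result : String), Dom_produce_sequences pattern max_length outer_index inner_index partial_result → Pre_produce_sequences pattern max_length outer_index inner_index partial_result → Spec_produce_sequences pattern max_length outer_index inner_index partial_result (produce_sequences pattern max_length outer_index inner_index partial_result)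

-- ===== LEMMAS AND PROOFS =====

theorem psMu_jump (plen : Nat) (max_length : Int) (oi : Int) (prlen : Nat)
    (h1 : -(plen : Int) ≤ oi) (h2 : oi < (plen : Int)) :
    psMu plen max_length (oi + 1) prlen < psMu plen max_length oi prlen := by
  unfold psMu
  apply Nat.add_lt_add_left
  omega

theorem psMu_same (plen : Nat) (max_length : Int) (oi oi' : Int) (prlen : Nat)
    (hlt : (prlen : Int) < max_length) :
    psMu plen max_length oi' (prlen + 1) < psMu plen max_length oi prlen := by
  unfold psMu
  have ha : max_length.toNat - prlen = (max_length.toNat - (prlen + 1)) + 1 := by omega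
  rw [ha, Nat.succ_mul (max_length.toNat - (prlen + 1)) (2 * plen + 1)]
  have hb : 2 * plen - (oi' + (plen : Int)).toNat ≤ 2 * plen := Nat.sub_le _ _
  calc (max_length.toNat - (prlen + 1)) * (2 * plen + 1) + (2 * plen - (oi' + (plen : Int)).toNat)
      < (max_length.toNat - (prlen + 1)) * (2 * plen + 1) + (2 * plen + 1) :=
        Nat.add_lt_add_left (Nat.lt_succ_of_le hb) _
    _ ≤ (max_length.toNat - (prlen + 1)) * (2 * plen + 1) + (2 * plen + 1)
          + (2 * plen - (oi + (plen : Int)).toNat) := Nat.le_add_right _ _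

theorem psInRange_of_pyGet? {α : Type} (xs : List α) (i : Int) (x : α)
    (h : PySem.List.pyGet? xs i = some x) : -(xs.length : Int) ≤ i ∧ i < (xs.length : Int) := by
  have hr : PySem.Raise.InRange xs.length i := by
    by_contra hc
    rw [← PySem.List.pyGet?_eq_none_iff] at hc
    simp [h] at hc
  simpa [PySem.Raise.InRange] using hr

theorem psPowsum_lt {a b f : Nat} (ha : a < f) (hb : b < f) : 3 ^ a + 3 ^ b < 3 ^ f := by
  have h1 : 3 ^ a ≤ 3 ^ (f - 1) := Nat.pow_le_pow_right (by omega) (by omega)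
  have h2 : 3 ^ b ≤ 3 ^ (f - 1) := Nat.pow_le_pow_right (by omega) (by omega)
  have h4 : 0 < 3 ^ (f - 1) := Nat.pow_pos (by omega)
  have hf : f - 1 + 1 = f := by omega
  calc 3 ^ a + 3 ^ b ≤ 3 ^ (f - 1) + 3 ^ (f - 1) := Nat.add_le_add h1 h2
    _ = 3 ^ (f - 1) * 2 := (Nat.mul_two _).symm
    _ < 3 ^ (f - 1) * 3 := mul_lt_mul_of_pos_left (by omega) h4
    _ = 3 ^ f := by rw [← Nat.pow_succ]; exact congrArg (fun n => 3 ^ n) hf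

-- Fuel adequacy for A's port: any fuel above psMu computes the same value (so fuel psMu + 1 is
-- the recursion A performs, and the 0-fuel branch is never reached).
theorem psAuxF_fuel (f : Nat) : ∀ (pattern : List String) (max_length : Int)
    (oi ii : Int) (pr : List Char),
    psMu pattern.length max_length oi pr.length < f →
    psAuxF f pattern max_length oi ii pr =
      psAuxF (psMu pattern.length max_length oi pr.length + 1) pattern max_length oi ii pr := by
  induction f using Nat.strong_induction_on with
  | _ f ih =>
    intro pattern max_length oi ii pr hf
    match f with
    | 0 => omega
    | g + 1 =>
      rw [psAuxF, psAuxF]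
      split
      · rfl
      · next hlen =>
        split
        · rfl
        · next current hc =>
          split
          · rfl
          · next hz =>
            split
            · rfl
            · next ch hch =>
              have hir := psInRange_of_pyGet? pattern oi current hc
              have hsame :
                  psMu pattern.length max_length oi (pr ++ [ch]).length <
                    psMu pattern.length max_length oi pr.length := by
                rw [List.length_append, List.length_singleton]
                exact psMu_same pattern.length max_length oi oi pr.length (by omega)
              congr 1
              · split
                · next hj =>
                  have hjump :
                      psMu pattern.length max_length (oi + 1) pr.length <
                        psMu pattern.length max_length oi pr.length :=
                    psMu_jump pattern.length max_length oi pr.length hir.1 hir.2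
                  rw [ih g (by omega) pattern max_length (oi + 1) 0 pr (by omega),
                      ih (psMu pattern.length max_length oi pr.length) (by omega)
                        pattern max_length (oi + 1) 0 pr (by omega)]
                · rfl
              · rw [ih g (by omega) pattern max_length oi _ (pr ++ [ch]) (by omega),
                    ih (psMu pattern.length max_length oi pr.length) (by omega)
                      pattern max_length oi _ (pr ++ [ch]) (by omega)]

-- Fuel adequacy + correctness for B's loop: with fuel at least the stack's measure, the loop
-- emits, in pop order, exactly the concatenation of A's recursion on each frame.
theorem psAltRunF_eq (f : Nat) : ∀ (pattern : List String) (max_length : Int)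
    (stack : List (Int × Int × List Char)) (results : List (List Char)),
    (stack.map (fun fr => 3 ^ psMu pattern.length max_length fr.1 fr.2.2.length)).sum ≤ f →
    psAltRunF f pattern max_length stack results =
      results ++ (stack.map (fun fr =>
        psAuxF (psMu pattern.length max_length fr.1 fr.2.2.length + 1)
          pattern max_length fr.1 fr.2.1 fr.2.2)).flatten := by
  induction f using Nat.strong_induction_on with
  | _ f ih =>
    intro pattern max_length stack results hf
    match stack with
    | [] => rw [psAltRunF]; simp
    | (oi, ii, pr) :: rest =>
      simp only [List.map_cons, List.sum_cons] at hf
      have hpow : 1 ≤ 3 ^ psMu pattern.length max_length oi pr.length :=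
        Nat.one_le_pow _ _ (by omega)
      match f with
      | 0 => omega
      | g + 1 =>
        rw [psAltRunF]
        simp only [List.map_cons, List.flatten_cons]
        rw [psAuxF]
        split
        · next hlen =>
          rw [ih g (by omega) pattern max_length rest (results ++ [pr]) (by omega)]
          simp [List.append_assoc]
        · next hlen =>
          split
          · next hc =>
            rw [ih g (by omega) pattern max_length rest results (by omega)]
            simp
          · next current hc =>
            split
            · next hz =>
              rw [ih g (by omega) pattern max_length rest results (by omega)]
              simp
            · next hz =>
              split
              · next hch =>
                rw [ih g (by omega) pattern max_length rest results (by omega)]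
                simp
              · next ch hch =>
                have hir := psInRange_of_pyGet? pattern oi current hc
                have hsame :
                    psMu pattern.length max_length oi (pr ++ [ch]).length <
                      psMu pattern.length max_length oi pr.length := by
                  rw [List.length_append, List.length_singleton]
                  exact psMu_same pattern.length max_length oi oi pr.length (by omega)
                split
                · next hj =>
                  have hjump :
                      psMu pattern.length max_length (oi + 1) pr.length <
                        psMu pattern.length max_length oi pr.length :=
                    psMu_jump pattern.length max_length oi pr.length hir.1 hir.2
                  have hsum : 3 ^ psMu pattern.length max_length (oi + 1) pr.length +
                      3 ^ psMu pattern.length max_length oi (pr ++ [ch]).length <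
                      3 ^ psMu pattern.length max_length oi pr.length :=
                    psPowsum_lt hjump hsame
                  rw [ih g (by omega) pattern max_length _ results
                      (by simp only [List.map_cons, List.sum_cons]; omega)]
                  rw [psAuxF_fuel (psMu pattern.length max_length oi pr.length)
                      pattern max_length (oi + 1) 0 pr hjump,
                    psAuxF_fuel (psMu pattern.length max_length oi pr.length)
                      pattern max_length oi _ (pr ++ [ch]) hsame]
                  simp [List.append_assoc]
                · next hj =>
                  have hsum : 3 ^ psMu pattern.length max_length oi (pr ++ [ch]).length <
                      3 ^ psMu pattern.length max_length oi pr.length :=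
                    Nat.pow_lt_pow_right (by omega) hsame
                  rw [ih g (by omega) pattern max_length _ results
                      (by simp only [List.map_cons, List.sum_cons]; omega)]
                  rw [psAuxF_fuel (psMu pattern.length max_length oi pr.length)
                      pattern max_length oi _ (pr ++ [ch]) hsame]
                  simp

-- ===== VERDICT (by name: the statement is the Claim_ definition above) =====
theorem produce_sequences_spec : Claim_equal_produce_sequences := by
  intro pattern max_length outer_index inner_index partial_result _ _
  unfold Spec_produce_sequences produce_sequences produce_sequences_alt
  rw [psAltRunF_eq _ pattern max_length _ [] (by simp)]
  simp
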